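-- pv_equiv track=rewrite | github.com/jackdeansmith/muntertool | muntertool/break_remove.py | concat_nonbreak_segments
-- ===== SOURCE A (Python) =====
-- def concat_nonbreak_segments(segments):
--     result = []
--
--     for (isBreak, points) in segments:
--         if(len(result) == 0):
--             result.append((isBreak, points))
--         else:
--             (last_segment_is_break, _) = result[-1]
--             if(not last_segment_is_break and not isBreak):
--                 result[-1][1].extend(points[1:])
--             else:
--                 result.append((isBreak, points))
--
--     return result
-- ===== SOURCE B (Python) =====
-- def concat_nonbreak_segments(segments):
--     # Run-based rewrite: split segments into maximal runs of equal isBreak flag;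
--     # break runs are copied through, a non-break run collapses to its first
--     # points list extended (in place, like A) with each later run member's points[1:].
--     result = []
--     i = 0
--     n = len(segments)
--     while i < n:
--         isBreak, pts = segments[i]
--         j = i + 1
--         while j < n and segments[j][0] == isBreak:
--             j += 1
--         if isBreak:
--             result.extend(segments[i:j])
--         else:
--             merged = pts
--             for _, p in segments[i + 1:j]:
--                 merged.extend(p[1:])
--             result.append((False, merged))
--         i = j
--     return result
-- ===== Notes on version B (the rewrite author's own statement) =====
-- stated objective: alternative
-- what changed: A folds segments one by one mutating/appending the last element of the result; B first delimits each maximal run of segments with equal isBreak flag and emits break runs verbatim and each non-break run as one merged segment.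
import Mathlib
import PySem

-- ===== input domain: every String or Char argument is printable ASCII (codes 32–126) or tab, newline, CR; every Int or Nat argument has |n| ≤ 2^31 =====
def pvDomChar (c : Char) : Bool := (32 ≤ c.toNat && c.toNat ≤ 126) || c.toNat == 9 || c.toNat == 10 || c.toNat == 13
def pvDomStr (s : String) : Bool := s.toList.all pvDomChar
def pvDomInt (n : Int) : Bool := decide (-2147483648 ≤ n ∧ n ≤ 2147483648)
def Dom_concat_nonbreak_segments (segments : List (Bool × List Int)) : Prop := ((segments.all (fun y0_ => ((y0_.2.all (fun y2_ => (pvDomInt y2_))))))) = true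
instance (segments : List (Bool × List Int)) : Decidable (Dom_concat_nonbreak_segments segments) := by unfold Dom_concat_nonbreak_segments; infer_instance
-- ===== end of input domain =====

-- B replaces A's element-at-a-time fold (append / mutate-last) by a run-at-a-time pass; return
-- values proved equal. Both Pythons mutate point lists of the input in place; the equivalence
-- proved here is about the RETURN value only.

-- ===== PORT A =====
-- A's loop body: result is the accumulator; result[-1] read via getLast?, the in-place
-- result[-1][1].extend(points[1:]) becomes replacing the last element; points[1:] = drop 1 (exact
-- for the constant nonnegative slice start 1).
def concat_nonbreak_segments (segments : List (Bool × List Int)) : List (Bool × List Int) :=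
  segments.foldl (fun result seg =>
    let (isBreak, points) := seg
    if result.length == 0 then
      result ++ [(isBreak, points)]
    else
      match result.getLast? with
      | some (last_segment_is_break, last_points) =>
        if !last_segment_is_break && !isBreak then
          result.dropLast ++ [(last_segment_is_break, last_points ++ points.drop 1)]
        else
          result ++ [(isBreak, points)]
      | none => result ++ [(isBreak, points)]) []

-- ===== PORT B =====
-- B's outer while loop: take the maximal run with the same flag (takeWhile/dropWhile mirror the
-- inner 'while j < n and segments[j][0] == isBreak' scan), then recurse on the remainder;
-- p[1:] = drop 1 as in A's port.
def concat_nonbreak_segments_alt (segments : List (Bool × List Int)) : List (Bool × List Int) :=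
  match segments with
  | [] => []
  | (isBreak, pts) :: rest =>
    let run := rest.takeWhile (fun s => s.1 == isBreak)
    let rest' := rest.dropWhile (fun s => s.1 == isBreak)
    if isBreak then
      ((isBreak, pts) :: run) ++ concat_nonbreak_segments_alt rest'
    else
      (false, pts ++ (run.map (fun s => s.2.drop 1)).flatten) :: concat_nonbreak_segments_alt rest'
termination_by segments.length
decreasing_by all_goals simpa using Nat.lt_succ_of_le (List.length_dropWhile_le _ _)

-- ===== PRECONDITION & SPEC =====
def Spec_concat_nonbreak_segments (segments : List (Bool × List Int)) (out : List (Bool × List Int)) : Prop := out = concat_nonbreak_segments_alt segments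
instance (segments : List (Bool × List Int)) (out : List (Bool × List Int)) : Decidable (Spec_concat_nonbreak_segments segments out) := by unfold Spec_concat_nonbreak_segments; infer_instance

-- ===== CLAIM (what is proved, stated in full; the proofs are below) =====
def Claim_equal_concat_nonbreak_segments : Prop := ∀ (segments : List (Bool × List Int)), Dom_concat_nonbreak_segments segments → Spec_concat_nonbreak_segments segments (concat_nonbreak_segments segments)

-- ===== LEMMAS AND PROOFS =====

-- Abbreviation for A's loop body (proof-side only).
def cnbsStep (result : List (Bool × List Int)) (seg : Bool × List Int) : List (Bool × List Int) :=
  let (isBreak, points) := seg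
  if result.length == 0 then
    result ++ [(isBreak, points)]
  else
    match result.getLast? with
    | some (last_segment_is_break, last_points) =>
      if !last_segment_is_break && !isBreak then
        result.dropLast ++ [(last_segment_is_break, last_points ++ points.drop 1)]
      else
        result ++ [(isBreak, points)]
    | none => result ++ [(isBreak, points)]

-- Tail of A's fold once the result is nonempty, abstracted to its last element (b, p).
def cnbsG (b : Bool) (p : List Int) : List (Bool × List Int) → List (Bool × List Int)
  | [] => [(b, p)]
  | (ib, pts) :: rest =>
    if !b && !ib then cnbsG b (p ++ pts.drop 1) rest
    else (b, p) :: cnbsG ib pts rest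

lemma cnbs_foldl_eq_G (segs : List (Bool × List Int)) :
    ∀ (pre : List (Bool × List Int)) (b : Bool) (p : List Int),
      segs.foldl cnbsStep (pre ++ [(b, p)]) = pre ++ cnbsG b p segs := by
  induction segs with
  | nil => intro pre b p; simp [cnbsG]
  | cons seg rest ih =>
    intro pre b p
    obtain ⟨ib, pts⟩ := seg
    simp only [List.foldl_cons, cnbsStep, cnbsG]
    rw [List.getLast?_concat]
    have hne : ((pre ++ [(b, p)]).length == 0) = false := by
      simp
    rw [hne]
    by_cases h : (!b && !ib) = true
    · simp only [h, if_true, Bool.false_eq_true, if_false, List.dropLast_concat]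
      rw [ih pre b (p ++ pts.drop 1)]
    · simp only [eq_false_of_ne_true h, Bool.false_eq_true, if_false]
      rw [show pre ++ [(b, p)] ++ [(ib, pts)] = (pre ++ [(b, p)]) ++ [(ib, pts)] from rfl,
          ih (pre ++ [(b, p)]) ib pts]
      simp

lemma cnbsG_eq_alt (segs : List (Bool × List Int)) :
    ∀ (b : Bool) (p : List Int),
      cnbsG b p segs = concat_nonbreak_segments_alt ((b, p) :: segs) := by
  induction segs with
  | nil =>
    intro b p
    have h0 : concat_nonbreak_segments_alt [] = [] := by rw [concat_nonbreak_segments_alt]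
    rw [concat_nonbreak_segments_alt]
    cases b <;> simp [cnbsG, h0]
  | cons seg rest ih =>
    intro b p
    obtain ⟨ib, pts⟩ := seg
    rw [concat_nonbreak_segments_alt]
    simp only [cnbsG]
    cases b
    · cases ib
      · -- both non-break: merge
        simp only [Bool.not_false, Bool.and_self, if_true]
        rw [ih false (p ++ pts.drop 1), concat_nonbreak_segments_alt]
        simp [List.takeWhile, List.dropWhile, List.append_assoc]
      · -- last non-break, current break: run ends
        simp only [List.takeWhile, List.dropWhile]
        norm_num
        rw [ih true pts]
    · -- last is break: always emit, run of trues collects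
      cases ib
      · simp only [List.takeWhile, List.dropWhile]
        norm_num
        rw [ih false pts]
      · simp only [List.takeWhile, List.dropWhile]
        norm_num
        rw [ih true pts, concat_nonbreak_segments_alt]
        simp

-- ===== VERDICT (by name: the statement is the Claim_ definition above) =====
theorem concat_nonbreak_segments_spec : Claim_equal_concat_nonbreak_segments := by
  intro segments _
  unfold Spec_concat_nonbreak_segments concat_nonbreak_segments
  cases segments with
  | nil => rw [concat_nonbreak_segments_alt]; rfl
  | cons seg rest =>
    obtain ⟨ib, pts⟩ := seg
    show List.foldl cnbsStep [] ((ib, pts) :: rest) = _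
    rw [List.foldl_cons,
        show cnbsStep [] (ib, pts) = [] ++ [(ib, pts)] from rfl,
        cnbs_foldl_eq_G rest [] ib pts, List.nil_append, cnbsG_eq_alt]
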